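-- pv_equiv track=rewrite | github.com/zorankiki/churn_analysis_based_on_behaviour_splited_var | fit_tv_cox_models.py | only_vars_wo_pairs_left
-- ===== SOURCE A (Python) =====
-- def get_key(val, dict_):
--     for key, value in dict_.items():
--         if val == value:
--             return key
--
-- def only_vars_wo_pairs_left(vars_for_dropping, vars_first_set, vars_second_set):
--     vars_of_interest = list(vars_first_set.keys())+list(vars_second_set.keys())
--     if len([x for x in vars_for_dropping if x not in vars_of_interest])>0:
--         return False
--     else:
--         vars_for_dropping_orig  = vars_for_dropping.copy()
--         for var_ in [x for x in vars_for_dropping if x in vars_of_interest]: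
--             if var_ in vars_first_set.keys():
--                 var_pair = get_key(vars_first_set[var_], vars_second_set)
--             elif var_ in vars_second_set.keys():
--                 var_pair = get_key(vars_second_set[var_], vars_first_set)
--
--             if var_pair not in vars_for_dropping_orig:
--                 vars_for_dropping.remove(var_)
--         if len(vars_for_dropping)==0:
--             return True
--         else:
--             return False
-- ===== SOURCE B (Python) =====
-- def only_vars_wo_pairs_left(vars_for_dropping, vars_first_set, vars_second_set):
--     # Reverse value->first-key maps built once, then a single early-exit pass.
--     rev_first = {}
--     for k, v in vars_first_set.items():
--         rev_first.setdefault(v, k)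
--     rev_second = {}
--     for k, v in vars_second_set.items():
--         rev_second.setdefault(v, k)
--     drop_set = set(vars_for_dropping)
--     for var_ in vars_for_dropping:
--         if var_ in vars_first_set:
--             pair = rev_second.get(vars_first_set[var_])
--         elif var_ in vars_second_set:
--             pair = rev_first.get(vars_second_set[var_])
--         else:
--             return False
--         if pair in drop_set:
--             return False
--     return True
-- ===== Notes on version B (the rewrite author's own statement) =====
-- stated objective: faster
-- what changed: Instead of calling get_key (a linear scan of the other dict) per droppable var and mutating the list with remove, B precomputes value-to-first-key reverse maps for both dicts and a set of the droppable vars once, then decides in one early-exit pass.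
import Mathlib
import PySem

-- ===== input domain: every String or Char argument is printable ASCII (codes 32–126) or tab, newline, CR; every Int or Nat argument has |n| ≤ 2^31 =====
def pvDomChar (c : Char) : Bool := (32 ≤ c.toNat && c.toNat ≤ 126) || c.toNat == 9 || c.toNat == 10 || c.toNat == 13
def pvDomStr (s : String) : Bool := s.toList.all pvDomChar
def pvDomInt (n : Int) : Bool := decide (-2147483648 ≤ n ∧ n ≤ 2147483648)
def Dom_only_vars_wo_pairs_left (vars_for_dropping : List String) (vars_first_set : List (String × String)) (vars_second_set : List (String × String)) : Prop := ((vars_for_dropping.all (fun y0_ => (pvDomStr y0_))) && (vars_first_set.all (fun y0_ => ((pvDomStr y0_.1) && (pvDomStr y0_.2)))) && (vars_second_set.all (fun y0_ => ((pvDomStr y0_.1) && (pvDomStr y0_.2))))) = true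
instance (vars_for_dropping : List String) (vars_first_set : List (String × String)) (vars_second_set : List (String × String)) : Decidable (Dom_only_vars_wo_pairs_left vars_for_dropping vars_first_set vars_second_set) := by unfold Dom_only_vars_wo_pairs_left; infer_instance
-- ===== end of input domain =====

-- B replaces A's per-var linear scans (get_key) and list.remove mutation by precomputed
-- value->first-key reverse maps plus a set, decided in one early-exit pass; equivalence is
-- about the RETURN value only (Python A mutates vars_for_dropping in place, B does not).


-- ===== PORT A =====
-- dicts arrive as association lists (insertion order, lookup = first match)
-- get_key(val, dict_): first key whose value equals val, else None
def get_key (val : String) (dict_ : List (String × String)) : Option String :=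
  match dict_ with
  | [] => none
  | (k, v) :: rest => if val = v then some k else get_key val rest

-- d[k] / 'k in d' under the assoc-list convention: first matching key
def dictGet? (k : String) (d : List (String × String)) : Option String :=
  match d with
  | [] => none
  | (k', v) :: rest => if k = k' then some v else dictGet? k rest

def only_vars_wo_pairs_left (vars_for_dropping : List String) (vars_first_set : List (String × String)) (vars_second_set : List (String × String)) : Bool :=
  let vars_of_interest := vars_first_set.map Prod.fst ++ vars_second_set.map Prod.fst
  if (vars_for_dropping.filter (fun x => !(vars_of_interest.contains x))).length > 0 then
    false
  else
    let orig := vars_for_dropping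
    -- state = (current vars_for_dropping, last var_pair); Python's var_pair persists across iterations
    let final := (vars_for_dropping.filter (fun x => vars_of_interest.contains x)).foldl
      (fun (st : List String × Option String) var_ =>
        let var_pair : Option String :=
          if (vars_first_set.map Prod.fst).contains var_ then
            get_key ((dictGet? var_ vars_first_set).getD "" /- guarded: KeyError unreachable -/) vars_second_set
          else if (vars_second_set.map Prod.fst).contains var_ then
            get_key ((dictGet? var_ vars_second_set).getD "") vars_first_set
          else st.2  -- unreachable: var_ came from the 'in vars_of_interest' filter
        let lst :=
          if (match var_pair with | some p => orig.contains p | none => false) then st.1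
          else (PySem.List.remove? st.1 var_).getD st.1  -- ValueError unreachable (each occurrence removed once)
        (lst, var_pair))
      (vars_for_dropping, none)
    decide (final.1.length = 0)

-- ===== PORT B =====
-- value -> first key reverse map (Source B: dict built with setdefault)
def revMap (d : List (String × String)) : List (String × String) :=
  d.foldl (fun acc kv => if (dictGet? kv.2 acc).isSome then acc else acc ++ [(kv.2, kv.1)]) []

-- Source B's single early-exit pass over vars_for_dropping
def bLoop (vars_first_set vars_second_set revFirst revSecond : List (String × String)) (dropSet : List String) : List String → Bool
  | [] => true
  | v :: rest =>
    match dictGet? v vars_first_set with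
    | some val =>
      (match dictGet? val revSecond with
       | some p => if dropSet.contains p then false
                   else bLoop vars_first_set vars_second_set revFirst revSecond dropSet rest
       | none => bLoop vars_first_set vars_second_set revFirst revSecond dropSet rest)
    | none =>
      match dictGet? v vars_second_set with
      | some val =>
        (match dictGet? val revFirst with
         | some p => if dropSet.contains p then false
                     else bLoop vars_first_set vars_second_set revFirst revSecond dropSet rest
         | none => bLoop vars_first_set vars_second_set revFirst revSecond dropSet rest)
      | none => false

def only_vars_wo_pairs_left_alt (vars_for_dropping : List String) (vars_first_set : List (String × String)) (vars_second_set : List (String × String)) : Bool :=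
  bLoop vars_first_set vars_second_set (revMap vars_first_set) (revMap vars_second_set)
    (PySem.Set.ofList vars_for_dropping) vars_for_dropping

-- ===== PRECONDITION & SPEC =====
def Spec_only_vars_wo_pairs_left (vars_for_dropping : List String) (vars_first_set : List (String × String)) (vars_second_set : List (String × String)) (out : Bool) : Prop := out = only_vars_wo_pairs_left_alt vars_for_dropping vars_first_set vars_second_set
instance (vars_for_dropping : List String) (vars_first_set : List (String × String)) (vars_second_set : List (String × String)) (out : Bool) : Decidable (Spec_only_vars_wo_pairs_left vars_for_dropping vars_first_set vars_second_set out) := by unfold Spec_only_vars_wo_pairs_left; infer_instance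

-- ===== CLAIM (what is proved, stated in full; the proofs are below) =====
def Claim_equal_only_vars_wo_pairs_left : Prop := ∀ (vars_for_dropping : List String) (vars_first_set : List (String × String)) (vars_second_set : List (String × String)), Dom_only_vars_wo_pairs_left vars_for_dropping vars_first_set vars_second_set → Spec_only_vars_wo_pairs_left vars_for_dropping vars_first_set vars_second_set (only_vars_wo_pairs_left vars_for_dropping vars_first_set vars_second_set)


-- ===== LEMMAS AND PROOFS =====

-- A's keys-membership test expressed through the lookup
theorem contains_fst_eq (d : List (String × String)) (v : String) :
    (d.map Prod.fst).contains v = (dictGet? v d).isSome := by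
  induction d with
  | nil => rfl
  | cons kv rest ih =>
    obtain ⟨k, val⟩ := kv
    by_cases h : v = k
    · simp [dictGet?, h]
    · have hb : (v == k) = false := by simp [h]
      have hd : dictGet? v ((k, val) :: rest) = dictGet? v rest := by simp [dictGet?, h]
      rw [hd, List.map_cons, List.contains_cons, hb, Bool.false_or, ih]

-- a present key's lookup succeeds
theorem dictGet?_isSome_of_mem : ∀ (d : List (String × String)) (k val : String), (k, val) ∈ d → (dictGet? k d).isSome = true := by
  intro d
  induction d with
  | nil => intro k val h; cases h
  | cons kv rest ih =>
    intro k val h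
    obtain ⟨a, b⟩ := kv
    by_cases hk : k = a
    · simp [dictGet?, hk]
    · rcases List.mem_cons.mp h with heq | hmem
      · cases heq; simp at hk
      · simp only [dictGet?, if_neg hk]
        exact ih k val hmem

-- the pair A computes for a var that is in one of the key sets
def pairOpt (first second : List (String × String)) (v : String) : Option String :=
  match dictGet? v first with
  | some val => get_key val second
  | none =>
    match dictGet? v second with
    | some val => get_key val first
    | none => none

-- "A keeps v": its pair is in the original dropping list
def keep (orig : List String) (first second : List (String × String)) (v : String) : Bool :=
  match pairOpt first second v with
  | some p => orig.contains p
  | none => false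

-- the list component of A's loop body
def stepL (orig : List String) (first second : List (String × String)) (lst : List String) (v : String) : List String :=
  if keep orig first second v then lst else (PySem.List.remove? lst v).getD lst

-- A's fold, projected to its list component (the carried var_pair is never read when every
-- iterated var is in one of the key sets)
theorem fold_proj (orig : List String) (first second : List (String × String)) :
    ∀ (l : List String) (st : List String × Option String),
      (∀ v ∈ l, ((first.map Prod.fst ++ second.map Prod.fst).contains v)) →
      (l.foldl
        (fun (st : List String × Option String) var_ =>
          let var_pair : Option String :=
            if (first.map Prod.fst).contains var_ then
              get_key ((dictGet? var_ first).getD "") second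
            else if (second.map Prod.fst).contains var_ then
              get_key ((dictGet? var_ second).getD "") first
            else st.2
          let lst :=
            if (match var_pair with | some p => orig.contains p | none => false) then st.1
            else (PySem.List.remove? st.1 var_).getD st.1
          (lst, var_pair)) st).1
      = l.foldl (stepL orig first second) st.1 := by
  intro l
  induction l with
  | nil => intro st _; rfl
  | cons v rest ih =>
    intro st hmem
    have hv := hmem v (by simp)
    have hrest : ∀ w ∈ rest, ((first.map Prod.fst ++ second.map Prod.fst).contains w) := by
      intro w hw; exact hmem w (by simp [hw])
    simp only [List.foldl_cons]
    rw [ih _ hrest]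
    congr 1
    by_cases hf : (dictGet? v first).isSome
    · obtain ⟨val1, h1⟩ := Option.isSome_iff_exists.mp hf
      simp only [stepL, keep, pairOpt, contains_fst_eq, h1]
      simp
    · have h1 : dictGet? v first = none := Option.not_isSome_iff_eq_none.mp hf
      by_cases hs : (dictGet? v second).isSome
      · obtain ⟨val2, h2⟩ := Option.isSome_iff_exists.mp hs
        simp only [stepL, keep, pairOpt, contains_fst_eq, h1, h2]
        simp
      · have h2 : dictGet? v second = none := Option.not_isSome_iff_eq_none.mp hs
        exfalso
        simp at hv
        rcases hv with ⟨x, hx⟩ | ⟨x, hx⟩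
        · exact hf (dictGet?_isSome_of_mem first v x hx)
        · exact hs (dictGet?_isSome_of_mem second v x hx)

-- count bookkeeping for A's removals
theorem count_fold_stepL (orig : List String) (first second : List (String × String)) :
    ∀ (l lst : List String), (∀ w, l.count w ≤ lst.count w) →
      ∀ w, (l.foldl (stepL orig first second) lst).count w
            = lst.count w - (if keep orig first second w then 0 else l.count w) := by
  intro l
  induction l with
  | nil => intro lst _ w; simp
  | cons v rest ih =>
    intro lst hle w
    have hcons : ∀ (u : String) (xs : List String), (v :: xs).count u = xs.count u + (if u = v then 1 else 0) := by
      intro u xs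
      by_cases huv : u = v
      · subst huv; simp
      · have huv' : ¬ (v = u) := fun hh => huv hh.symm
        simp [huv, huv']
    have hv1 : 1 ≤ lst.count v := by
      have h := hle v; rw [hcons v rest] at h; simp at h; omega
    have hvmem : v ∈ lst := List.count_pos_iff.mp (by omega)
    have herase : ∀ u, (lst.erase v).count u = lst.count u - (if u = v then 1 else 0) := by
      intro u
      by_cases huv : u = v
      · subst huv; simp [List.count_erase_self]
      · simp [List.count_erase_of_ne huv, huv]
    by_cases hk : keep orig first second v
    · have hstep : stepL orig first second lst v = lst := by simp [stepL, hk]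
      have hle' : ∀ u, rest.count u ≤ lst.count u := by
        intro u; have h := hle u; rw [hcons u rest] at h; omega
      rw [List.foldl_cons, hstep, ih lst hle' w]
      by_cases hwv : w = v
      · subst hwv; simp [hk]
      · rw [hcons w rest]; simp [hwv]
    · have hstep : stepL orig first second lst v = lst.erase v := by
        simp [stepL, hk, PySem.List.remove?_eq_some_erase lst v hvmem]
      have hle' : ∀ u, rest.count u ≤ (lst.erase v).count u := by
        intro u
        have h := hle u; rw [hcons u rest] at h
        rw [herase u]; omega
      rw [List.foldl_cons, hstep, ih _ hle' w, herase w, hcons w rest]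
      by_cases hwv : w = v
      · subst hwv
        have h := hle w; rw [hcons w rest] at h; simp at h
        simp [hk]; omega
      · simp [hwv]

-- emptiness of A's final list: every dropped var's pair is outside the original list
theorem final_empty_iff (first second : List (String × String)) (drop : List String) :
    ((drop.foldl (stepL drop first second) drop).length = 0)
      ↔ (∀ w ∈ drop, keep drop first second w = false) := by
  have hcnt := count_fold_stepL drop first second drop drop (fun w => le_refl _)
  constructor
  · intro hlen w hw
    have hres : drop.foldl (stepL drop first second) drop = [] := List.length_eq_zero_iff.mp hlen
    by_contra hkeep
    have hk : keep drop first second w = true := by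
      cases h : keep drop first second w
      · exact absurd h hkeep
      · rfl
    have := hcnt w
    rw [hres, hk] at this
    simp at this
    have : drop.count w = 0 := by omega
    exact absurd (List.count_pos_iff.mpr hw) (by omega)
  · intro hall
    rw [List.length_eq_zero_iff]
    rw [List.eq_nil_iff_forall_not_mem]
    intro w hw
    have hpos := List.count_pos_iff.mpr hw
    have := hcnt w
    by_cases hmem : w ∈ drop
    · rw [hall w hmem] at this; simp at this; omega
    · have : drop.count w = 0 := List.count_eq_zero.mpr hmem
      have h2 := hcnt w
      rw [this] at h2
      simp at h2
      omega

-- lookup after appending one binding at the right end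
theorem dictGet?_append_single (acc : List (String × String)) (v k val : String) :
    dictGet? val (acc ++ [(v, k)]) = (dictGet? val acc).or (if val = v then some k else none) := by
  induction acc with
  | nil => simp [dictGet?]
  | cons kv rest ih =>
    by_cases h : val = kv.1
    · simp [dictGet?, h]
    · simp [dictGet?, h, ih]

-- a lookup in B's reverse map is exactly A's get_key scan
theorem revMap_get (val : String) :
    ∀ (d acc : List (String × String)),
      dictGet? val (d.foldl (fun acc kv => if (dictGet? kv.2 acc).isSome then acc else acc ++ [(kv.2, kv.1)]) acc)
        = (dictGet? val acc).or (get_key val d) := by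
  intro d
  induction d with
  | nil => intro acc; simp [get_key]
  | cons kv rest ih =>
    intro acc
    simp only [List.foldl_cons]
    rcases h : dictGet? kv.2 acc with _ | k0
    · simp only [Option.isSome_none, Bool.false_eq_true, if_false]
      rw [ih, dictGet?_append_single, Option.or_assoc]
      congr 1
      by_cases hv : val = kv.2
      · simp [get_key, hv]
      · simp [get_key, hv]
    · simp only [Option.isSome_some, if_true]
      rw [ih]
      by_cases hv : val = kv.2
      · subst hv; simp [h, get_key]
      · simp [get_key, hv]

theorem revMap_get' (val : String) (d : List (String × String)) :
    dictGet? val (revMap d) = get_key val d := by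
  rw [revMap, revMap_get]; simp [dictGet?]

-- B's early-exit loop is an 'all' over a pointwise test
def bOk (first second revFirst revSecond : List (String × String)) (dropSet : List String) (v : String) : Bool :=
  match dictGet? v first with
  | some val =>
    (match dictGet? val revSecond with
     | some p => !dropSet.contains p
     | none => true)
  | none =>
    match dictGet? v second with
    | some val =>
      (match dictGet? val revFirst with
       | some p => !dropSet.contains p
       | none => true)
    | none => false

theorem bLoop_eq_all (first second revFirst revSecond : List (String × String)) (dropSet : List String) :
    ∀ l : List String,
      bLoop first second revFirst revSecond dropSet l
        = l.all (bOk first second revFirst revSecond dropSet) := by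
  intro l
  induction l with
  | nil => rfl
  | cons v rest ih =>
    simp only [bLoop, List.all_cons, bOk]
    rcases h1 : dictGet? v first with _ | val1
    · rcases h2 : dictGet? v second with _ | val2
      · simp
      · rcases h3 : dictGet? val2 revFirst with _ | p
        · simp [h3, ih]
        · by_cases hc : p ∈ dropSet
          · simp [h3, hc]
          · simp [h3, hc, ih]
    · rcases h3 : dictGet? val1 revSecond with _ | p
      · simp [h3, ih]
      · by_cases hc : p ∈ dropSet
        · simp [h3, hc]
        · simp [h3, hc, ih]

-- B's pointwise test, in A's vocabulary
theorem bOk_eq (first second : List (String × String)) (drop : List String) (v : String) :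
    bOk first second (revMap first) (revMap second) (PySem.Set.ofList drop) v
      = (((first.map Prod.fst ++ second.map Prod.fst).contains v) && !(keep drop first second v)) := by
  simp only [bOk, keep, pairOpt, revMap_get', List.contains_append, contains_fst_eq]
  rcases h1 : dictGet? v first with _ | val1
  · rcases h2 : dictGet? v second with _ | val2
    · simp
    · rcases h3 : get_key val2 first with _ | p
      · simp [h3]
      · simp [h3]
  · rcases h3 : get_key val1 second with _ | p
    · simp [h3]
    · simp [h3]

-- ===== VERDICT (by name: the statement is the Claim_ definition above) =====
theorem only_vars_wo_pairs_left_spec : Claim_equal_only_vars_wo_pairs_left := by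
  intro drop first second _
  unfold Spec_only_vars_wo_pairs_left only_vars_wo_pairs_left only_vars_wo_pairs_left_alt
  dsimp only
  rw [bLoop_eq_all]
  by_cases hall : ∀ v ∈ drop, ((first.map Prod.fst ++ second.map Prod.fst).contains v) = true
  · have hfilter0 : drop.filter (fun x => !((first.map Prod.fst ++ second.map Prod.fst).contains x)) = [] := by
      rw [List.filter_eq_nil_iff]
      intro v hv
      rw [hall v hv]
      simp
    have hfilter1 : drop.filter (fun x => ((first.map Prod.fst ++ second.map Prod.fst).contains x)) = drop :=
      List.filter_eq_self.mpr hall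
    rw [hfilter0, hfilter1]
    simp only [List.length_nil, gt_iff_lt, lt_self_iff_false, if_false]
    rw [fold_proj drop first second drop (drop, none) hall]
    have hA := final_empty_iff first second drop
    have hB : (drop.all (bOk first second (revMap first) (revMap second) (PySem.Set.ofList drop))) = true
        ↔ (∀ w ∈ drop, keep drop first second w = false) := by
      rw [List.all_eq_true]
      constructor
      · intro h w hw
        have hbw := h w hw
        rw [bOk_eq, hall w hw] at hbw
        simpa using hbw
      · intro h w hw
        rw [bOk_eq, hall w hw, h w hw]
        rfl
    rw [Bool.eq_iff_iff]
    simp only [decide_eq_true_eq]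
    rw [hA, hB]
  · rw [not_forall] at hall
    obtain ⟨v, hall⟩ := hall
    rw [not_forall] at hall
    obtain ⟨hv, hnc⟩ := hall
    have hcf : ((first.map Prod.fst ++ second.map Prod.fst).contains v) = false := by
      cases h : ((first.map Prod.fst ++ second.map Prod.fst).contains v)
      · rfl
      · exact absurd h hnc
    have hvf : v ∈ drop.filter (fun x => !((first.map Prod.fst ++ second.map Prod.fst).contains x)) :=
      List.mem_filter.mpr ⟨hv, by rw [hcf]; rfl⟩
    have hfpos : 0 < (drop.filter (fun x => !((first.map Prod.fst ++ second.map Prod.fst).contains x))).length :=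
      List.length_pos_of_mem hvf
    rw [if_pos hfpos]
    cases hb : drop.all (bOk first second (revMap first) (revMap second) (PySem.Set.ofList drop))
    · rfl
    · exfalso
      have hbv := List.all_eq_true.mp hb v hv
      rw [bOk_eq, hcf] at hbv
      simp at hbv
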